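-- pv_equiv track=rewrite | github.com/jwsearle18/bioinformatics_algorithms | src/bwt_matching.py | create_occurrence_list
-- ===== SOURCE A (Python) =====
-- from typing import List, Tuple, Dict
--
-- def create_occurrence_list(text: str) -> List[Tuple[str, int]]:
--     """
--     Creates a list of tuples of (character, occurrence) for a string.
--
--     Args:
--         text: The input string.
--
--     Returns:
--         A list of tuples, where each tuple is (character, occurrence count).
--     """
--     occurrence_list = []
--     char_occurrences: Dict[str, int] = {}
--     for char in text:
--         char_occurrences[char] = char_occurrences.get(char, 0) + 1
--         num_occurrence = char_occurrences[char]
--         occurrence_list.append((char, num_occurrence))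
--     return occurrence_list
-- ===== SOURCE B (Python) =====
-- def create_occurrence_list(text):
--     """
--     Creates a list of tuples of (character, occurrence) for a string.
--
--     Group-by then scatter: first index the positions of each character, then
--     write (char, occurrence number) into a pre-sized result list by position.
--     """
--     positions = {}
--     for i, c in enumerate(text):
--         positions.setdefault(c, []).append(i)
--     result = [("", 0)] * len(text)
--     for c, idxs in positions.items():
--         for i, p in enumerate(idxs):
--             result[p] = (c, i + 1)
--     return result
-- ===== Notes on version B (the rewrite author's own statement) =====
-- stated objective: alternative
-- what changed: Replaces the single stateful pass that maintains a running per-character counter dict with a group-by pass that indexes each character's positions followed by a scatter pass that writes (char, i+1) into a pre-sized result list by position.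
import Mathlib
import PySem

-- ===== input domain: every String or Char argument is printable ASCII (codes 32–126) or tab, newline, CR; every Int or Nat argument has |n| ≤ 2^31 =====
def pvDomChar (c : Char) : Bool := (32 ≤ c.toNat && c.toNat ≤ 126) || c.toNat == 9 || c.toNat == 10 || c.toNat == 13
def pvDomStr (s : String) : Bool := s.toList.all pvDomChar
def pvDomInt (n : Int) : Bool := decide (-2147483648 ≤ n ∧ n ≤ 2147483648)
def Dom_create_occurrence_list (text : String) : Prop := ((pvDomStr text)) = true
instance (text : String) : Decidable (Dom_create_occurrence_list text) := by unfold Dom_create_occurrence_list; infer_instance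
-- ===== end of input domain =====

-- B replaces A's running-counter loop with a group-by-character index pass followed by a scatter pass writing each occurrence number by position (alternative algorithm, same asymptotic cost).


-- ===== PORT A =====
-- loop body: char_occurrences[char] = char_occurrences.get(char, 0) + 1; append (char, char_occurrences[char])
def colStep (st : List (String × Int) × PySem.Dict Char Int) (char : Char) :
    List (String × Int) × PySem.Dict Char Int :=
  let d := st.2.insert char (st.2.getD char 0 + 1)
  let num := d.getD char 0
  (st.1 ++ [(String.ofList [char], num)], d)

def create_occurrence_list (text : String) : List (String × Int) :=
  (text.toList.foldl colStep ([], PySem.Dict.empty)).1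

-- ===== PORT B =====
-- first pass: positions[c] = list of indices at which c occurs (insertion-ordered dict)
def groupPositions (chars : List Char) : PySem.Dict Char (List Int) :=
  (PySem.List.enumerate chars 0).foldl (fun d p => d.modify p.2 [] (· ++ [p.1])) PySem.Dict.empty

-- second pass, one group: for i, p in enumerate(idxs): result[p] = (c, i + 1)
def scatterGroup (result : List (String × Int)) (kv : Char × List Int) : List (String × Int) :=
  (PySem.List.enumerate kv.2 0).foldl
    (fun r q => PySem.List.pySetD r q.2 (String.ofList [kv.1], q.1 + 1)) result

def create_occurrence_list_alt (text : String) : List (String × Int) :=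
  (groupPositions text.toList).items.foldl scatterGroup
    (List.replicate text.toList.length ("", 0))

-- ===== PRECONDITION & SPEC =====
def Spec_create_occurrence_list (text : String) (out : List (String × Int)) : Prop := out = create_occurrence_list_alt text
instance (text : String) (out : List (String × Int)) : Decidable (Spec_create_occurrence_list text out) := by unfold Spec_create_occurrence_list; infer_instance

-- ===== CLAIM (what is proved, stated in full; the proofs are below) =====
def Claim_equal_create_occurrence_list : Prop := ∀ (text : String), Dom_create_occurrence_list text → Spec_create_occurrence_list text (create_occurrence_list text)

-- ===== LEMMAS AND PROOFS =====

-- the common characterisation both ports are proved equal to: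
-- entry j is (text[j], number of occurrences of text[j] in text[:j+1])
def tgt (l : List Char) : List (String × Int) :=
  (PySem.List.enumerate l 0).map (fun p =>
    (String.ofList [p.2], (((l.take (p.1.toNat + 1)).count p.2 : Int))))

-- ---- A-side ----

-- the dict component of A's fold is exactly the counting fold of PySem
theorem colFold_snd (l : List Char) (acc : List (String × Int)) (d : PySem.Dict Char Int) :
    (l.foldl colStep (acc, d)).2 = l.foldl (fun d x => d.insert x (d.getD x 0 + 1)) d := by
  induction l generalizing acc d with
  | nil => rfl
  | cons c l ih => simp [List.foldl_cons, colStep, ih]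

theorem a_eq_tgt (l : List Char) :
    (l.foldl colStep ([], PySem.Dict.empty)).1 = tgt l := by
  induction l using List.reverseRecOn with
  | nil => rfl
  | append_singleton l c ih =>
    rw [List.foldl_append]
    have hd : (l.foldl colStep ([], PySem.Dict.empty)).2.getD c 0 = (l.count c : Int) := by
      rw [colFold_snd]
      simp [PySem.Dict.getD_foldl_insert_add_one]
    simp only [List.foldl_cons, List.foldl_nil, colStep, PySem.Dict.getD_insert_self, hd]
    rw [ih]
    unfold tgt
    rw [PySem.List.enumerate_append, List.map_append]
    congr 1
    · apply List.map_congr_left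
      intro p hp
      rcases (PySem.List.mem_enumerate_iff _ _ _).1 hp with ⟨k, hk, rfl⟩
      simp
      rw [List.take_append_of_le_length (by omega)]
    · simp only [PySem.List.enumerate_cons, PySem.List.enumerate_nil, List.map_cons, List.map_nil]
      have hn : ((0:Int) + l.length).toNat + 1 = l.length + 1 := by omega
      have htake : (l ++ [c]).take (l.length + 1) = l ++ [c] := by
        apply List.take_of_length_le; simp
      simp [htake, List.count_append]

-- ---- B-side ----

-- the index list the grouping pass stores for character c
def occIdxs (l : List Char) (c : Char) : List Int :=
  ((PySem.List.enumerate l 0).filter (fun p => p.2 == c)).map (·.1)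

theorem occIdxs_append (l : List Char) (c' c : Char) :
    occIdxs (l ++ [c']) c
      = occIdxs l c ++ (if c' == c then [(l.length : Int)] else []) := by
  unfold occIdxs
  rw [PySem.List.enumerate_append, List.filter_append, List.map_append]
  congr 1
  by_cases hc : c' = c
  · subst hc; simp [PySem.List.enumerate_cons, PySem.List.enumerate_nil]
  · simp [PySem.List.enumerate_cons, PySem.List.enumerate_nil, hc]

theorem occIdxs_length (l : List Char) (c : Char) :
    (occIdxs l c).length = l.count c := by
  induction l using List.reverseRecOn with
  | nil => rfl
  | append_singleton l c' ih =>
    rw [occIdxs_append, List.length_append, ih, List.count_append]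
    by_cases hc : c' = c
    · subst hc; simp
    · simp [hc]

-- the i-th stored index of c is a position k with l[k] = c whose prefix holds exactly i+1 copies of c
theorem occIdxs_spec (l : List Char) (c : Char) :
    ∀ (i : Nat) (pos : Int), (occIdxs l c)[i]? = some pos →
      ∃ k : Nat, pos = (k : Int) ∧ ∃ hk : k < l.length,
        l[k] = c ∧ ((l.take (k + 1)).count c : Int) = (i : Int) + 1 := by
  induction l using List.reverseRecOn with
  | nil => intro i pos h; simp [occIdxs] at h
  | append_singleton l c' ih =>
    intro i pos h
    rw [occIdxs_append] at h
    by_cases hi : i < (occIdxs l c).length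
    · rw [List.getElem?_append_left hi] at h
      rcases ih i pos h with ⟨k, rfl, hk, hkc, hcount⟩
      refine ⟨k, rfl, by simp; omega, ?_, ?_⟩
      · rw [List.getElem_append_left hk]; exact hkc
      · rw [List.take_append_of_le_length (by omega)]; exact hcount
    · rw [List.getElem?_append_right (by omega)] at h
      by_cases hc : c' == c
      · simp only [hc, if_true] at h
        have hi0 : i - (occIdxs l c).length = 0 := by
          by_contra hne
          rw [List.getElem?_eq_none_iff.2 (by simp; omega)] at h
          simp at h
        rw [hi0] at h
        simp at h
        have hieq : i = l.count c := by
          have := occIdxs_length l c; omega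
        refine ⟨l.length, by omega, by simp, ?_, ?_⟩
        · rw [List.getElem_append_right (le_refl _)]
          simpa using (LawfulBEq.eq_of_beq hc)
        · have htake : (l ++ [c']).take (l.length + 1) = l ++ [c'] := by
            apply List.take_of_length_le; simp
          rw [htake, List.count_append]
          have hc' : c' = c := LawfulBEq.eq_of_beq hc
          simp [hc', hieq]
      · simp only [hc] at h
        simp at h

-- generic scatter: folding in-range writes whose values agree with tg reads back tg at written positions
theorem foldl_pySetD_getElem? {α : Type} (W : List (Int × α)) (tg : List α) :
    ∀ (r : List α), r.length = tg.length →
      (∀ q ∈ W, ∃ k : Nat, q.1 = (k : Int) ∧ tg[k]? = some q.2) →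
      ∀ j : Nat, (W.foldl (fun r q => PySem.List.pySetD r q.1 q.2) r)[j]?
        = if (j : Int) ∈ W.map (·.1) then tg[j]? else r[j]? := by
  induction W with
  | nil => intro r _ _ j; simp
  | cons q W ih =>
    intro r hlen hW j
    rcases hW q (List.mem_cons_self) with ⟨k, hq1, hqv⟩
    have hk : k < tg.length := by
      rcases List.getElem?_eq_some_iff.1 hqv with ⟨h, _⟩; exact h
    rw [List.foldl_cons, hq1, PySem.List.pySetD_natCast]
    rw [ih (r.set k q.2) (by simp [hlen]) (fun p hp => hW p (List.mem_cons_of_mem _ hp)) j]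
    by_cases hmem : (j : Int) ∈ W.map (·.1)
    · simp [hmem]
    · by_cases hj : j = k
      · subst hj
        simp [hmem, hq1, hlen, hk, hqv.symm]
      · have : ((j : Int) = q.1) = False := by
          simp [hq1]; omega
        simp [hmem, this, Ne.symm hj]

-- a fold of folds is a fold of the flattened write list
theorem foldl_foldl_eq_foldl_flatMap {α β γ : Type} (xs : List α) (F : α → List β)
    (g : γ → β → γ) (r0 : γ) :
    xs.foldl (fun r x => (F x).foldl g r) r0 = (xs.flatMap F).foldl g r0 := by
  induction xs generalizing r0 with
  | nil => rfl
  | cons x xs ih => rw [List.flatMap_cons, List.foldl_append, List.foldl_cons, ih]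

-- the grouping pass, characterised: keys are the distinct chars, value at c is occIdxs
theorem groupPositions_getD (l : List Char) (c : Char) :
    (groupPositions l).getD c [] = occIdxs l c := by
  unfold groupPositions
  rw [show (PySem.List.enumerate l 0).foldl (fun d p => d.modify p.2 [] (· ++ [p.1])) PySem.Dict.empty
      = ((PySem.List.enumerate l 0).map Prod.swap).foldl
          (fun d p => d.modify p.1 [] (· ++ [p.2])) PySem.Dict.empty from by rw [List.foldl_map]; rfl]
  rw [PySem.Dict.getD_foldl_modify_append]
  simp [occIdxs, List.filter_map, List.map_map, Function.comp_def, Prod.swap]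

theorem groupPositions_keys (l : List Char) :
    (groupPositions l).keys = PySem.Set.ofList l := by
  unfold groupPositions
  rw [PySem.Dict.keys_foldl_modify_key (PySem.List.enumerate l 0) (·.2) []
      (fun _ p v => v ++ [p.1]) PySem.Dict.empty]
  rw [PySem.List.map_snd_enumerate]
  exact PySem.Set.update_empty l

theorem groupPositions_nodup (l : List Char) :
    (groupPositions l).keys.Nodup := by
  unfold groupPositions
  exact PySem.Dict.nodup_keys_foldl_modify_key (PySem.List.enumerate l 0) (·.2) []
      (fun _ p v => v ++ [p.1]) PySem.Dict.empty PySem.Dict.nodup_keys_empty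

theorem groupPositions_items (l : List Char) :
    (groupPositions l).items = (PySem.Set.ofList l).map (fun c => (c, occIdxs l c)) := by
  rw [PySem.Dict.items_eq_map_keys (groupPositions l) (groupPositions_nodup l) [],
    groupPositions_keys]
  apply List.map_congr_left
  intro c _
  rw [groupPositions_getD]

-- the flattened write list of B's second pass
def writes (l : List Char) : List (Int × (String × Int)) :=
  ((PySem.Set.ofList l).map (fun c => (c, occIdxs l c))).flatMap
    (fun kv => (PySem.List.enumerate kv.2 0).map (fun q => (q.2, (String.ofList [kv.1], q.1 + 1))))

theorem b_eq_writes_fold (text : String) :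
    create_occurrence_list_alt text
      = (writes text.toList).foldl (fun r q => PySem.List.pySetD r q.1 q.2)
          (List.replicate text.toList.length ("", 0)) := by
  unfold create_occurrence_list_alt writes
  rw [groupPositions_items]
  rw [show scatterGroup = (fun (r : List (String × Int)) kv =>
      ((PySem.List.enumerate kv.2 0).map (fun q => (q.2, (String.ofList [kv.1], q.1 + 1)))).foldl
        (fun r q => PySem.List.pySetD r q.1 q.2) r) from by
    funext r kv; unfold scatterGroup; rw [List.foldl_map]]
  rw [foldl_foldl_eq_foldl_flatMap]

-- every write stores exactly the tgt entry of its position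
theorem writes_sound (l : List Char) :
    ∀ q ∈ writes l, ∃ k : Nat, q.1 = (k : Int) ∧ (tgt l)[k]? = some q.2 := by
  intro q hq
  rcases List.mem_flatMap.1 hq with ⟨kv, hkv, hq2⟩
  rcases List.mem_map.1 hkv with ⟨c, _, rfl⟩
  rcases List.mem_map.1 hq2 with ⟨p, hp, rfl⟩
  rcases (PySem.List.mem_enumerate_iff _ _ _).1 hp with ⟨i, hi, rfl⟩
  simp only
  have hget : (occIdxs l c)[i]? = some ((occIdxs l c)[i]) := List.getElem?_eq_getElem hi
  rcases occIdxs_spec l c i _ hget with ⟨k, hpos, hk, hkc, hcount⟩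
  refine ⟨k, by simpa using hpos, ?_⟩
  unfold tgt
  rw [List.getElem?_map, PySem.List.getElem?_enumerate, List.getElem?_eq_getElem hk]
  simp [hkc, hcount]

-- every position below len gets written
theorem writes_cover (l : List Char) :
    ∀ j : Nat, j < l.length → (j : Int) ∈ (writes l).map (·.1) := by
  intro j hj
  have hcl : l[j] ∈ l := List.getElem_mem hj
  have hmemIdx : (j : Int) ∈ occIdxs l l[j] := by
    unfold occIdxs
    apply List.mem_map.2
    refine ⟨((0 : Int) + j, l[j]), ?_, by simp⟩
    apply List.mem_filter.2
    exact ⟨(PySem.List.mem_enumerate_iff _ _ _).2 ⟨j, hj, rfl⟩, by simp⟩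
  rcases List.mem_iff_getElem.1 hmemIdx with ⟨i, hi, hgi⟩
  apply List.mem_map.2
  refine ⟨((j : Int), (String.ofList [l[j]], (i : Int) + 1)), ?_, rfl⟩
  apply List.mem_flatMap.2
  refine ⟨(l[j], occIdxs l l[j]), List.mem_map.2 ⟨l[j], (PySem.Set.mem_ofList _ _).2 hcl, rfl⟩, ?_⟩
  apply List.mem_map.2
  refine ⟨((0 : Int) + (i : Int), (j : Int)), ?_, by simp⟩
  exact (PySem.List.mem_enumerate_iff _ _ _).2 ⟨i, hi, by rw [hgi]⟩

theorem b_eq_tgt (text : String) :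
    create_occurrence_list_alt text = tgt text.toList := by
  rw [b_eq_writes_fold]
  apply List.ext_getElem?
  intro j
  rw [foldl_pySetD_getElem? (writes text.toList) (tgt text.toList) _
      (by simp [tgt, PySem.List.length_enumerate]) (writes_sound text.toList) j]
  by_cases hj : j < text.toList.length
  · simp [writes_cover text.toList j hj]
  · have hlen : text.toList.length = text.length := by simp
    have h1 : (tgt text.toList)[j]? = none := by
      apply List.getElem?_eq_none_iff.2
      simp [tgt, PySem.List.length_enumerate]; omega
    have h2 : (List.replicate text.toList.length (("", 0) : String × Int))[j]? = none := by
      apply List.getElem?_eq_none_iff.2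
      simp; omega
    rw [h1, h2]; simp

-- ===== VERDICT (by name: the statement is the Claim_ definition above) =====
theorem create_occurrence_list_spec : Claim_equal_create_occurrence_list := by
  intro text _
  show create_occurrence_list text = create_occurrence_list_alt text
  rw [b_eq_tgt]
  exact a_eq_tgt text.toList
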